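-- pv_equiv track=rewrite | github.com/anz2/NER | MAX_ENT_FILES/feature_engineering.py | get_dictionary_from_text
-- ===== SOURCE A (Python) =====
-- def get_dictionary_from_text(text, test=False):
--     if not test:
--         data = {'token': [], 'pos': [], 'BIO': []}
--         for line in text.split('\n'):
--             if line == '':
--                 data['token'].append('')
--                 data['pos'].append('')
--                 data['BIO'].append('')
--             else:
--                 tok, pos, chk = line.split('\t')
--                 data['token'].append(tok)
--                 data['pos'].append(pos)
--                 data['BIO'].append(chk)
--     else:
--         data = {'token': [], 'pos': []}
--         for line in text.split('\n'):
--             if line == '':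
--                 data['token'].append('')
--                 data['pos'].append('')
--             else:
--                 tok, pos = line.split('\t')
--                 data['token'].append(tok)
--                 data['pos'].append(pos)
--
--     return data
-- ===== SOURCE B (Python) =====
-- def get_dictionary_from_text(text, test=False):
--     keys = ['token', 'pos'] if test else ['token', 'pos', 'BIO']
--     n = len(keys)
--     rows = []
--     for line in text.split('\n'):
--         if line == '':
--             rows.append(('',) * n)
--         else:
--             parts = line.split('\t')
--             if len(parts) != n:
--                 raise ValueError('expected %d columns' % n)
--             rows.append(tuple(parts))
--     cols = [list(c) for c in zip(*rows)]
--     return dict(zip(keys, cols))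
-- ===== Notes on version B (the rewrite author's own statement) =====
-- stated objective: simpler
-- what changed: B collects per-line row tuples in one uniform loop (keys chosen up front) and then transposes the rows into the column dict with zip(*rows), replacing A's two duplicated branches of per-column appends.
import Mathlib
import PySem

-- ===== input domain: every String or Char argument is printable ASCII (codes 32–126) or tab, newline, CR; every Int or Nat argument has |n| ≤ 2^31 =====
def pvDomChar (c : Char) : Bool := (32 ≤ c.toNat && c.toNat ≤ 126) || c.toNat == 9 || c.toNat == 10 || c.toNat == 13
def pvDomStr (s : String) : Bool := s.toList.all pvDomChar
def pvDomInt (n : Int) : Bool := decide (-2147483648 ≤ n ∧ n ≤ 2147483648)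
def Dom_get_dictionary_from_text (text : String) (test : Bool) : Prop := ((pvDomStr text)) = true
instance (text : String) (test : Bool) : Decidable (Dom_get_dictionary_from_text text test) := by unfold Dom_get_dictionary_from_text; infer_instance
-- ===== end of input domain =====

-- B replaces A's two duplicated per-column-append loops by one uniform row-collection loop
-- followed by a transpose into the column dict (objective: simpler).

-- text.split('\n') ('\n' ≠ '', so split? is always `some`; getD is never the default)
def pvLines (text : String) : List String := (PySem.Str.split? text "\n").getD []

-- line.split('\t')
def pvFields (line : String) : List String := (PySem.Str.split? line "\t").getD []

-- ===== PORT A =====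
-- A's dict {'token':…, 'pos':…, 'BIO':…} is kept as its three (resp. two) column lists in
-- insertion order; each branch appends to the same columns A appends to.  On a line whose
-- tab-split does not unpack (Python raises ValueError there; excluded by Pre_) the fold
-- leaves the state unchanged (arbitrary outside Pre_).
def get_dictionary_from_text (text : String) (test : Bool) : List (String × List String) :=
  if test = false then
    let st := (pvLines text).foldl
      (fun (d : List String × List String × List String) line =>
        if line = "" then (d.1 ++ [""], d.2.1 ++ [""], d.2.2 ++ [""])
        else match pvFields line with
          | [tok, pos, chk] => (d.1 ++ [tok], d.2.1 ++ [pos], d.2.2 ++ [chk])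
          | _ => d) ([], [], [])
    [("token", st.1), ("pos", st.2.1), ("BIO", st.2.2)]
  else
    let st := (pvLines text).foldl
      (fun (d : List String × List String) line =>
        if line = "" then (d.1 ++ [""], d.2 ++ [""])
        else match pvFields line with
          | [tok, pos] => (d.1 ++ [tok], d.2 ++ [pos])
          | _ => d) ([], [])
    [("token", st.1), ("pos", st.2)]

-- ===== PORT B =====
-- rows.append(('',)*n) / tuple(parts): one row per line, each of length n under Pre_.
def pvRowOf (n : Nat) (line : String) : List String :=
  if line = "" then List.replicate n "" else pvFields line

-- [list(c) for c in zip(*rows)]: column i is rows.map (·[i]); exact when every row has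
-- length n (guaranteed by Pre_; zip(*rows) would truncate otherwise).
def pvCols (n : Nat) (rows : List (List String)) : List (List String) :=
  (List.range n).map (fun i => rows.map (fun r => r.getD i ""))

def get_dictionary_from_text_alt (text : String) (test : Bool) : List (String × List String) :=
  let keys := if test then ["token", "pos"] else ["token", "pos", "BIO"]
  let n := keys.length
  let rows := (pvLines text).map (pvRowOf n)
  keys.zip (pvCols n rows)

-- ===== PRECONDITION & SPEC =====
-- A raises ValueError on any nonempty line whose tab-split does not have exactly 3
-- (resp. 2 with test=True) fields; exactly those inputs are excluded.
def Pre_get_dictionary_from_text (text : String) (test : Bool) : Prop :=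
  ∀ line ∈ pvLines text, line = "" ∨ (pvFields line).length = (if test then 2 else 3)
instance (text : String) (test : Bool) : Decidable (Pre_get_dictionary_from_text text test) := by
  unfold Pre_get_dictionary_from_text; infer_instance

def pvWitness_get_dictionary_from_text : String × Bool := ("a\tDT\tO\n\nb\tNN\tB-LOC", false)

def Spec_get_dictionary_from_text (text : String) (test : Bool) (out : List (String × List String)) : Prop := out = get_dictionary_from_text_alt text test
instance (text : String) (test : Bool) (out : List (String × List String)) : Decidable (Spec_get_dictionary_from_text text test out) := by unfold Spec_get_dictionary_from_text; infer_instance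

-- ===== CLAIM (what is proved, stated in full; the proofs are below) =====
def Claim_equal_get_dictionary_from_text : Prop := ∀ (text : String) (test : Bool), Dom_get_dictionary_from_text text test → Pre_get_dictionary_from_text text test → Spec_get_dictionary_from_text text test (get_dictionary_from_text text test)

-- ===== LEMMAS AND PROOFS =====

-- column i of B's rows, as a map over the lines
def pvCol (n : Nat) (i : Nat) (ls : List String) : List String :=
  ls.map (fun line => (pvRowOf n line).getD i "")

theorem pvFold3 (ls : List String)
    (h : ∀ line ∈ ls, line = "" ∨ (pvFields line).length = 3) :
    ∀ a b c : List String,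
      ls.foldl (fun (d : List String × List String × List String) line =>
        if line = "" then (d.1 ++ [""], d.2.1 ++ [""], d.2.2 ++ [""])
        else match pvFields line with
          | [tok, pos, chk] => (d.1 ++ [tok], d.2.1 ++ [pos], d.2.2 ++ [chk])
          | _ => d) (a, b, c)
      = (a ++ pvCol 3 0 ls, b ++ pvCol 3 1 ls, c ++ pvCol 3 2 ls) := by
  induction ls with
  | nil => intro a b c; simp [pvCol]
  | cons l ls ih =>
    intro a b c
    have hl := h l (by simp)
    have hrest : ∀ line ∈ ls, line = "" ∨ (pvFields line).length = 3 :=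
      fun line hm => h line (by simp [hm])
    by_cases he : l = ""
    · subst he
      simp only [List.foldl_cons, if_pos rfl]
      rw [ih hrest]
      simp [pvCol, pvRowOf]
    · rcases hl with h0 | hlen
      · exact absurd h0 he
      · obtain ⟨x, y, z, hxyz⟩ : ∃ x y z, pvFields l = [x, y, z] := by
          match hf : pvFields l with
          | [x, y, z] => exact ⟨x, y, z, rfl⟩
          | [] => rw [hf] at hlen; simp at hlen
          | [_] => rw [hf] at hlen; simp at hlen
          | [_, _] => rw [hf] at hlen; simp at hlen
          | _ :: _ :: _ :: _ :: _ => rw [hf] at hlen; simp at hlen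
        simp only [List.foldl_cons, if_neg he, hxyz]
        rw [ih hrest]
        simp [pvCol, pvRowOf, if_neg he, hxyz]

theorem pvFold2 (ls : List String)
    (h : ∀ line ∈ ls, line = "" ∨ (pvFields line).length = 2) :
    ∀ a b : List String,
      ls.foldl (fun (d : List String × List String) line =>
        if line = "" then (d.1 ++ [""], d.2 ++ [""])
        else match pvFields line with
          | [tok, pos] => (d.1 ++ [tok], d.2 ++ [pos])
          | _ => d) (a, b)
      = (a ++ pvCol 2 0 ls, b ++ pvCol 2 1 ls) := by
  induction ls with
  | nil => intro a b; simp [pvCol]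
  | cons l ls ih =>
    intro a b
    have hl := h l (by simp)
    have hrest : ∀ line ∈ ls, line = "" ∨ (pvFields line).length = 2 :=
      fun line hm => h line (by simp [hm])
    by_cases he : l = ""
    · subst he
      simp only [List.foldl_cons, if_pos rfl]
      rw [ih hrest]
      simp [pvCol, pvRowOf]
    · rcases hl with h0 | hlen
      · exact absurd h0 he
      · obtain ⟨x, y, hxy⟩ : ∃ x y, pvFields l = [x, y] := by
          match hf : pvFields l with
          | [x, y] => exact ⟨x, y, rfl⟩
          | [] => rw [hf] at hlen; simp at hlen
          | [_] => rw [hf] at hlen; simp at hlen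
          | _ :: _ :: _ :: _ => rw [hf] at hlen; simp at hlen
        simp only [List.foldl_cons, if_neg he, hxy]
        rw [ih hrest]
        simp [pvCol, pvRowOf, if_neg he, hxy]

theorem pvCols_eq (n : Nat) (ls : List String) :
    pvCols n (ls.map (pvRowOf n)) = (List.range n).map (fun i => pvCol n i ls) := by
  simp [pvCols, pvCol, List.map_map, Function.comp]

-- ===== VERDICT (by name: the statement is the Claim_ definition above) =====
theorem get_dictionary_from_text_spec : Claim_equal_get_dictionary_from_text := by
  intro text test _ hpre
  unfold Spec_get_dictionary_from_text
  unfold Pre_get_dictionary_from_text at hpre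
  cases test with
  | false =>
    simp only [get_dictionary_from_text, if_pos rfl]
    rw [pvFold3 (pvLines text) (by simpa using hpre)]
    simp [get_dictionary_from_text_alt, pvCols_eq, List.range_succ]
  | true =>
    simp only [get_dictionary_from_text, if_neg (by decide : ¬ (true = false))]
    rw [pvFold2 (pvLines text) (by simpa using hpre)]
    simp [get_dictionary_from_text_alt, pvCols_eq, List.range_succ]
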